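-- pv_equiv track=rewrite | github.com/peachyplayzrb/thesis | final_artefact/src/observability/main.py | parse_exclusion_samples
-- ===== SOURCE A (Python) =====
-- def parse_exclusion_samples(rows: list[dict[str, str]], field: str, limit: int) -> dict[str, list[dict[str, str]]]:
--     grouped: dict[str, list[dict[str, str]]] = {}
--     for row in rows:
--         key = row.get(field, "")
--         if not key:
--             continue
--         grouped.setdefault(key, [])
--         if len(grouped[key]) >= limit:
--             continue
--         grouped[key].append(row)
--     return grouped
-- ===== SOURCE B (Python) =====
-- def parse_exclusion_samples(rows: list[dict[str, str]], field: str, limit: int) -> dict[str, list[dict[str, str]]]: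
--     # Pass 1: group every matching row with no cap; pass 2: truncate each group.
--     full: dict[str, list[dict[str, str]]] = {}
--     for row in rows:
--         key = row.get(field, "")
--         if key:
--             full.setdefault(key, []).append(row)
--     cap = max(limit, 0)
--     return {k: v[:cap] for k, v in full.items()}
-- ===== Notes on version B (the rewrite author's own statement) =====
-- stated objective: alternative
-- what changed: B replaces A's per-row setdefault-then-cap-check bookkeeping with a two-pass scheme: one uncapped grouping pass, then a dict comprehension truncating each group to max(limit, 0).
import Mathlib
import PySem

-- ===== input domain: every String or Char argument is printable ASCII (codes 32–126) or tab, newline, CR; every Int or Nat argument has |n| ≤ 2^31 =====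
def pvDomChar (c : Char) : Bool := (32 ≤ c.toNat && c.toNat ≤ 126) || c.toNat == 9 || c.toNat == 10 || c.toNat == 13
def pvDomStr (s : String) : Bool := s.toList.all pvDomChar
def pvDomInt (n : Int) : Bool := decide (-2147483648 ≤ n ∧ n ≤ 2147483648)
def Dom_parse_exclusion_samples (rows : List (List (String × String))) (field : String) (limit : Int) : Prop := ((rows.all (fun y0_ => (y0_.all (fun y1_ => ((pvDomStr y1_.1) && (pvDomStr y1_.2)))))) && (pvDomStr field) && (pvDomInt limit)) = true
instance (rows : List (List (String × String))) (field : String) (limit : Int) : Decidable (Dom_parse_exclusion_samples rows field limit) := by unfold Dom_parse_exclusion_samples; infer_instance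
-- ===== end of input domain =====

-- B replaces A's per-row cap bookkeeping with an uncapped grouping pass followed by a truncation pass (alternative decomposition, same cost).


-- ===== PORT A =====
def pvRowKey (field : String) (row : List (String × String)) : String :=
  PySem.Dict.getD (PySem.Dict.mk row) field ""

-- row.get(field, "") is pvRowKey; 'not key' on a string is key = ""
def parse_exclusion_samples (rows : List (List (String × String))) (field : String) (limit : Int) : List (String × List (List (String × String))) :=
  (rows.foldl (fun grouped row =>
      let key := pvRowKey field row
      if key = "" then grouped
      else
        let grouped := PySem.Dict.setdefault grouped key []
        if limit ≤ ((PySem.Dict.getD grouped key []).length : Int) then grouped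
        else PySem.Dict.insert grouped key (PySem.Dict.getD grouped key [] ++ [row]))
    PySem.Dict.empty).items

-- ===== PORT B =====
-- full.setdefault(key, []).append(row) is Dict.modify; v[:cap] with cap = max(limit,0) ≥ 0 is List.take
def parse_exclusion_samples_alt (rows : List (List (String × String))) (field : String) (limit : Int) : List (String × List (List (String × String))) :=
  let full := rows.foldl (fun d row =>
      let key := pvRowKey field row
      if key = "" then d
      else PySem.Dict.modify d key [] (fun v => v ++ [row]))
    PySem.Dict.empty
  full.items.map (fun p => (p.1, p.2.take (max limit 0).toNat))

-- ===== PRECONDITION & SPEC =====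
def Spec_parse_exclusion_samples (rows : List (List (String × String))) (field : String) (limit : Int) (out : List (String × List (List (String × String)))) : Prop := out = parse_exclusion_samples_alt rows field limit
instance (rows : List (List (String × String))) (field : String) (limit : Int) (out : List (String × List (List (String × String)))) : Decidable (Spec_parse_exclusion_samples rows field limit out) := by unfold Spec_parse_exclusion_samples; infer_instance

-- ===== CLAIM (what is proved, stated in full; the proofs are below) =====
def Claim_equal_parse_exclusion_samples : Prop := ∀ (rows : List (List (String × String))) (field : String) (limit : Int), Dom_parse_exclusion_samples rows field limit → Spec_parse_exclusion_samples rows field limit (parse_exclusion_samples rows field limit)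

-- ===== LEMMAS AND PROOFS =====

def pvTrunc (cap : Nat) (d : PySem.Dict String (List (List (String × String)))) : PySem.Dict String (List (List (String × String))) :=
  PySem.Dict.mk (d.items.map (fun p => (p.1, p.2.take cap)))

theorem pvGet?_trunc (cap : Nat) (d : PySem.Dict String (List (List (String × String)))) (k : String) :
    (pvTrunc cap d).get? k = (d.get? k).map (List.take cap) := by
  simp [pvTrunc, PySem.Dict.get?, List.find?_map, Function.comp_def, Option.map_map]

theorem pvContains_trunc (cap : Nat) (d : PySem.Dict String (List (List (String × String)))) (k : String) :
    (pvTrunc cap d).contains k = d.contains k := by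
  simp [pvTrunc, PySem.Dict.contains, List.any_map, Function.comp_def]

theorem pvGetD_trunc (cap : Nat) (d : PySem.Dict String (List (List (String × String)))) (k : String) :
    (pvTrunc cap d).getD k [] = (d.getD k []).take cap := by
  rw [PySem.Dict.getD, PySem.Dict.getD, pvGet?_trunc]
  cases d.get? k <;> simp

theorem pvTrunc_insert (cap : Nat) (d : PySem.Dict String (List (List (String × String)))) (k : String)
    (v : List (List (String × String))) :
    pvTrunc cap (d.insert k v) = (pvTrunc cap d).insert k (v.take cap) := by
  apply PySem.Dict.ext
  by_cases hc : d.contains k = true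
  · have hc' : (pvTrunc cap d).contains k = true := by rw [pvContains_trunc]; exact hc
    rw [PySem.Dict.items_insert_of_contains _ _ hc']
    simp only [pvTrunc]
    rw [PySem.Dict.items_insert_of_contains _ _ hc]
    simp only [List.map_map]
    apply List.map_congr_left
    intro p _
    by_cases h : p.1 = k <;> simp [h]
  · have hcf : d.contains k = false := by simpa using hc
    have hc' : (pvTrunc cap d).contains k = false := by rw [pvContains_trunc]; exact hcf
    rw [PySem.Dict.items_insert_of_not_contains _ _ hc']
    simp only [pvTrunc]
    rw [PySem.Dict.items_insert_of_not_contains _ _ hcf]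
    simp

theorem pvInsert_getD_self (d : PySem.Dict String (List (List (String × String)))) (k : String)
    (dflt : List (List (String × String))) (hnd : d.keys.Nodup) (hc : d.contains k = true) :
    d.insert k (d.getD k dflt) = d := by
  apply PySem.Dict.ext
  rw [PySem.Dict.items_insert_of_contains _ _ hc]
  conv_rhs => rw [← List.map_id d.items]
  apply List.map_congr_left
  intro p hp
  obtain ⟨p1, p2⟩ := p
  by_cases h : p1 = k
  · have hv : d.getD k dflt = p2 := by
      refine PySem.Dict.getD_of_mem_items _ ?_ hnd dflt
      rw [← h]; exact hp
    subst h
    simp [hv]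
  · simp [h]

theorem pvKeys_trunc (cap : Nat) (d : PySem.Dict String (List (List (String × String)))) :
    (pvTrunc cap d).keys = d.keys := by
  simp [pvTrunc, PySem.Dict.keys]

-- A's body on one row, applied to the truncated dict, equals the truncation of B's body on that row.
theorem pvStep (field : String) (limit : Int) (row : List (String × String))
    (d : PySem.Dict String (List (List (String × String)))) (hnd : d.keys.Nodup) :
    (if pvRowKey field row = "" then pvTrunc (max limit 0).toNat d
     else
       if limit ≤ ((PySem.Dict.getD (PySem.Dict.setdefault (pvTrunc (max limit 0).toNat d) (pvRowKey field row) []) (pvRowKey field row) []).length : Int)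
       then PySem.Dict.setdefault (pvTrunc (max limit 0).toNat d) (pvRowKey field row) []
       else PySem.Dict.insert (PySem.Dict.setdefault (pvTrunc (max limit 0).toNat d) (pvRowKey field row) []) (pvRowKey field row)
              (PySem.Dict.getD (PySem.Dict.setdefault (pvTrunc (max limit 0).toNat d) (pvRowKey field row) []) (pvRowKey field row) [] ++ [row])) =
    pvTrunc (max limit 0).toNat
      (if pvRowKey field row = "" then d
       else PySem.Dict.modify d (pvRowKey field row) [] (fun v => v ++ [row])) := by
  set cap := (max limit 0).toNat with hcap
  set k := pvRowKey field row with hkdef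
  by_cases hk : k = ""
  · rw [if_pos hk, if_pos hk]
  · rw [if_neg hk, if_neg hk]
    by_cases hc : d.contains k = true
    · have hcT : (pvTrunc cap d).contains k = true := by rw [pvContains_trunc]; exact hc
      rw [PySem.Dict.setdefault_of_contains _ _ hcT, pvGetD_trunc]
      by_cases hlim : limit ≤ ((((d.getD k []).take cap)).length : Int)
      · rw [if_pos hlim, PySem.Dict.modify, pvTrunc_insert]
        have hle : cap ≤ (d.getD k []).length := by
          rw [List.length_take] at hlim
          omega
        rw [List.take_append_of_le_length hle, ← pvGetD_trunc]
        exact (pvInsert_getD_self _ _ _ (by rw [pvKeys_trunc]; exact hnd) hcT).symm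
      · rw [if_neg hlim, PySem.Dict.modify, pvTrunc_insert]
        rw [List.length_take] at hlim
        have h1 : (d.getD k []).length < cap := by omega
        rw [List.take_of_length_le (le_of_lt h1),
          List.take_of_length_le (show (d.getD k [] ++ [row]).length ≤ cap by simp; omega)]
    · have hcf : d.contains k = false := by simpa using hc
      have hcT : (pvTrunc cap d).contains k = false := by rw [pvContains_trunc]; exact hcf
      rw [PySem.Dict.setdefault_of_not_contains _ _ hcT, PySem.Dict.getD_insert_self,
        PySem.Dict.modify, PySem.Dict.getD_of_not_contains _ _ hcf, pvTrunc_insert]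
      simp only [List.nil_append, List.length_nil, Nat.cast_zero]
      by_cases hlim : limit ≤ (0 : Int)
      · rw [if_pos hlim]
        have hc0 : cap = 0 := by omega
        rw [hc0]
        rfl
      · rw [if_neg hlim, PySem.Dict.insert_insert_self,
          List.take_of_length_le (show ([row] : List (List (String × String))).length ≤ cap by simp; omega)]

theorem pvNodup_step (field : String) (row : List (String × String))
    (d : PySem.Dict String (List (List (String × String)))) (hnd : d.keys.Nodup) :
    (if pvRowKey field row = "" then d
     else PySem.Dict.modify d (pvRowKey field row) [] (fun v => v ++ [row])).keys.Nodup := by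
  split
  · exact hnd
  · exact PySem.Dict.nodup_keys_insert _ _ _ hnd

theorem pvFold (field : String) (limit : Int) (rows : List (List (String × String))) :
    ∀ d : PySem.Dict String (List (List (String × String))), d.keys.Nodup →
    rows.foldl (fun grouped row =>
      let key := pvRowKey field row
      if key = "" then grouped
      else
        let grouped := PySem.Dict.setdefault grouped key []
        if limit ≤ ((PySem.Dict.getD grouped key []).length : Int) then grouped
        else PySem.Dict.insert grouped key (PySem.Dict.getD grouped key [] ++ [row]))
      (pvTrunc (max limit 0).toNat d) =
    pvTrunc (max limit 0).toNat
      (rows.foldl (fun d row =>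
        let key := pvRowKey field row
        if key = "" then d
        else PySem.Dict.modify d key [] (fun v => v ++ [row])) d) := by
  induction rows with
  | nil => intro d _; rfl
  | cons row rest ih =>
    intro d hnd
    simp only [List.foldl_cons]
    rw [pvStep field limit row d hnd]
    exact ih _ (pvNodup_step field row d hnd)


-- ===== VERDICT (by name: the statement is the Claim_ definition above) =====
theorem parse_exclusion_samples_spec : Claim_equal_parse_exclusion_samples := by
  intro rows field limit _
  unfold Spec_parse_exclusion_samples parse_exclusion_samples parse_exclusion_samples_alt
  have h := pvFold field limit rows PySem.Dict.empty (by simp [PySem.Dict.keys, PySem.Dict.empty])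
  have he : pvTrunc (max limit 0).toNat PySem.Dict.empty = PySem.Dict.empty := rfl
  rw [he] at h
  rw [h]
  rfl
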